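-- pv_equiv track=rewrite | github.com/sergei-mironov/aicli | python/litrepl-aicli.py | compute_indent_prefix
-- ===== SOURCE A (Python) =====
-- def leading_spaces(s:str) -> str:
--   """Return leading spaces of a string (a)."""
--   i = 0
--   while i < len(s) and s[i] == " ":
--     i += 1
--   return s[:i]
--
-- def compute_indent_prefix(selection_text:str) -> str:
--   """Compute common leading-space prefix of nonempty lines.  Skip empty/whitespace-only lines (a).
--   Initialize from the first nonempty line (b). Truncate by min length for each next line (c)."""
--   prefix = None
--   for line in selection_text.split('\n'):
--     if not line.strip():  # (a)
--       continue
--     ls = leading_spaces(line)  # (c)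
--     if prefix is None:
--       prefix = ls  # (b)
--       continue
--     prefix = prefix[:min(len(prefix), len(ls))]  # (c)
--   return prefix or ""
-- ===== SOURCE B (Python) =====
-- def compute_indent_prefix(selection_text: str) -> str:
--     """Common leading-space prefix of nonempty lines, by vertical scan:
--     probe column k across all nonempty lines at once, advancing k while
--     every line has a space in that column."""
--     lines = [line for line in selection_text.split('\n') if line.strip()]
--     if not lines:
--         return ''
--     k = 0
--     while all(k < len(line) and line[k] == ' ' for line in lines):
--         k += 1
--     return ' ' * k
-- ===== Notes on version B (the rewrite author's own statement) =====
-- stated objective: alternative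
-- what changed: Replaces A's per-line pass maintaining a running string prefix by a vertical column scan: B filters the nonempty lines once, then advances a column index k while every line has a space at column k, returning k spaces.
import Mathlib
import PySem

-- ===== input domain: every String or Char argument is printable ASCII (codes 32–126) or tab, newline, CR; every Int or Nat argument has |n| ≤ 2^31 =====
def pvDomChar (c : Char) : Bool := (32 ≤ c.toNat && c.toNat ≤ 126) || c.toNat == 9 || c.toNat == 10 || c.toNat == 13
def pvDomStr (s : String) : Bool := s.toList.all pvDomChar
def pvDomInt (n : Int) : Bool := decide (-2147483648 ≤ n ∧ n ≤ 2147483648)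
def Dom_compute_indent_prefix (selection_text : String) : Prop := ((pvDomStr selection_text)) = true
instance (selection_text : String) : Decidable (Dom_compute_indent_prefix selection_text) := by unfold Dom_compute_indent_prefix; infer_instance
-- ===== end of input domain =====

-- B replaces A's running string-prefix accumulator by a vertical column scan over the nonempty lines (objective: alternative).

-- ===== PORT A =====
-- while i < len(s) and s[i] == ' ': i += 1; return s[:i]  — the obvious structural recursion over the chars
def pvLeadA : List Char → List Char
  | [] => []
  | c :: t => if c == ' ' then c :: pvLeadA t else []

def leading_spaces (s : List Char) : List Char := pvLeadA s

def compute_indent_prefix (selection_text : String) : String :=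
  let pfx := (PySem.Chars.splitOn selection_text.toList ['\n']).foldl
    (fun pfx line =>
      if PySem.Chars.strip line == [] then pfx          -- if not line.strip(): continue
      else
        let ls := leading_spaces line
        match pfx with
        | none   => some ls                              -- prefix is None
        | some p => some (p.take (min p.length ls.length)))   -- prefix[:min(len(prefix), len(ls))]
    none
  String.ofList (pfx.getD [])                            -- return prefix or ""  (None and "" both yield "")

-- ===== PORT B =====
-- the while loop: advance k while all lines have ' ' at column k; fuel bounds the
-- loop only for totality (the condition itself forces k < (first line).length)
def pvScan (lines : List (List Char)) (k : Nat) : Nat → Nat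
  | 0 => k
  | fuel + 1 =>
      if lines.all (fun l => decide (k < l.length) && (l.getD k ' ' == ' ')) then
        pvScan lines (k + 1) fuel
      else k

def compute_indent_prefix_alt (selection_text : String) : String :=
  let lines := (PySem.Chars.splitOn selection_text.toList ['\n']).filter
      (fun l => !(PySem.Chars.strip l == []))            -- [line for line in … if line.strip()]
  match lines with
  | [] => ""                                             -- if not lines: return ''
  | h :: t => String.ofList (List.replicate (pvScan (h :: t) 0 h.length) ' ')  -- ' ' * k

-- ===== PRECONDITION & SPEC =====
def Spec_compute_indent_prefix (selection_text : String) (out : String) : Prop := out = compute_indent_prefix_alt selection_text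
instance (selection_text : String) (out : String) : Decidable (Spec_compute_indent_prefix selection_text out) := by unfold Spec_compute_indent_prefix; infer_instance

-- ===== CLAIM =====
def Claim_equal_compute_indent_prefix : Prop := ∀ (selection_text : String), Dom_compute_indent_prefix selection_text → Spec_compute_indent_prefix selection_text (compute_indent_prefix selection_text)

-- ===== LEMMAS AND PROOFS =====

def pvCnt (l : List Char) : Nat := (l.takeWhile (fun c => c == ' ')).length

theorem pvLeadA_eq (cs : List Char) : pvLeadA cs = List.replicate (pvCnt cs) ' ' := by
  induction cs with
  | nil => rfl
  | cons c t ih =>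
      by_cases h : c = ' '
      · simp [pvLeadA, pvCnt, h, List.replicate_succ]
        simp [pvCnt] at ih
        exact ih
      · simp [pvLeadA, pvCnt, h]

-- A's fold step, named for the induction
def pvStepA (pfx : Option (List Char)) (line : List Char) : Option (List Char) :=
  if PySem.Chars.strip line == [] then pfx
  else
    let ls := leading_spaces line
    match pfx with
    | none   => some ls
    | some p => some (p.take (min p.length ls.length))

def pvCounts (L : List (List Char)) : List Nat :=
  (L.filter (fun l => !(PySem.Chars.strip l == []))).map pvCnt

theorem pvFold_some (L : List (List Char)) (n : Nat) :
    L.foldl pvStepA (some (List.replicate n ' '))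
      = some (List.replicate ((pvCounts L).foldl min n) ' ') := by
  induction L generalizing n with
  | nil => rfl
  | cons l t ih =>
      simp only [List.foldl, pvStepA, pvCounts, List.filter]
      by_cases h : PySem.Chars.strip l == []
      · simp only [h, if_true]
        simpa [pvCounts] using ih n
      · rw [if_neg (by simpa using h)]
        have hls : leading_spaces l = List.replicate (pvCnt l) ' ' := pvLeadA_eq l
        have hrw : (List.replicate n ' ').take
              (min (List.replicate n ' ').length (leading_spaces l).length)
            = List.replicate (min n (pvCnt l)) ' ' := by
          simp [hls, List.take_replicate]
        rw [hrw]
        have htl := ih (min n (pvCnt l))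
        simp only [pvCounts] at htl
        rw [htl]
        congr 2
        simp [h, List.foldl_cons]

theorem pvFold_none (L : List (List Char)) :
    L.foldl pvStepA none
      = match pvCounts L with
        | [] => none
        | c :: t => some (List.replicate (t.foldl min c) ' ') := by
  induction L with
  | nil => rfl
  | cons l t ih =>
      simp only [List.foldl, pvStepA, pvCounts, List.filter]
      by_cases h : PySem.Chars.strip l == []
      · simp only [h, if_true]
        simpa [pvCounts] using ih
      · rw [if_neg (by simpa using h)]
        rw [show leading_spaces l = List.replicate (pvCnt l) ' ' from pvLeadA_eq l, pvFold_some]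
        simp [h, pvCounts]

-- a ≤ foldl min over a list
theorem pv_le_foldl_min (t : List Nat) (c a : Nat) :
    a ≤ t.foldl min c ↔ a ≤ c ∧ ∀ x ∈ t, a ≤ x := by
  induction t generalizing c with
  | nil => simp
  | cons x xs ih =>
      simp only [List.foldl_cons, ih, le_min_iff, List.mem_cons]
      constructor
      · rintro ⟨⟨h1, h2⟩, h3⟩; exact ⟨h1, fun y hy => by rcases hy with rfl | hy; exact h2; exact h3 y hy⟩
      · rintro ⟨h1, h2⟩; exact ⟨⟨h1, h2 x (Or.inl rfl)⟩, fun y hy => h2 y (Or.inr hy)⟩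

theorem pv_foldl_min_le_init (t : List Nat) (c : Nat) : t.foldl min c ≤ c := by
  induction t generalizing c with
  | nil => simp
  | cons x xs ih => exact le_trans (ih (min c x)) (min_le_left _ _)

-- char-level facts about pvCnt
theorem pvCnt_lt_getD (l : List Char) (k : Nat) (h : k < pvCnt l) :
    k < l.length ∧ l.getD k ' ' = ' ' := by
  induction l generalizing k with
  | nil => simp [pvCnt] at h
  | cons c t ih =>
      by_cases hc : c = ' '
      · have hcnt : pvCnt (c :: t) = pvCnt t + 1 := by
          simp [pvCnt, List.takeWhile, hc]
        cases k with
        | zero => exact ⟨by simp, by simp [List.getD, hc]⟩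
        | succ k =>
            rw [hcnt] at h
            have ht := ih k (Nat.lt_of_succ_lt_succ h)
            exact ⟨by simpa using Nat.succ_lt_succ ht.1, by simpa [List.getD] using ht.2⟩
      · have hcnt : pvCnt (c :: t) = 0 := by
          simp [pvCnt, List.takeWhile, Bool.eq_false_iff.2 (by simpa using hc : ¬((c == ' ') = true))]
        rw [hcnt] at h
        omega

theorem pvCnt_stop (l : List Char) (h : pvCnt l < l.length) :
    l.getD (pvCnt l) ' ' ≠ ' ' := by
  induction l with
  | nil => simp at h
  | cons c t ih =>
      by_cases hc : c = ' '
      · have hcnt : pvCnt (c :: t) = pvCnt t + 1 := by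
          simp [pvCnt, List.takeWhile, hc]
        rw [hcnt] at h ⊢
        simpa [List.getD] using ih (by simpa using Nat.lt_of_succ_lt_succ h)
      · have hcnt : pvCnt (c :: t) = 0 := by
          simp [pvCnt, List.takeWhile, Bool.eq_false_iff.2 (by simpa using hc : ¬((c == ' ') = true))]
        rw [hcnt]
        simpa [List.getD] using hc

theorem pvCnt_le_length (l : List Char) : pvCnt l ≤ l.length := by
  induction l with
  | nil => simp [pvCnt]
  | cons c t ih =>
      by_cases hc : c = ' '
      · have hcnt : pvCnt (c :: t) = pvCnt t + 1 := by
          simp [pvCnt, List.takeWhile, hc]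
        rw [hcnt]; simpa using ih
      · have hcnt : pvCnt (c :: t) = 0 := by
          simp [pvCnt, List.takeWhile, Bool.eq_false_iff.2 (by simpa using hc : ¬((c == ' ') = true))]
        rw [hcnt]; omega

-- the column-k test is exactly "k < pvCnt l", provided k ≤ pvCnt l
theorem pv_cond_iff (l : List Char) (k : Nat) (hk : k ≤ pvCnt l) :
    ((decide (k < l.length) && (l.getD k ' ' == ' ')) = true) ↔ k < pvCnt l := by
  constructor
  · intro h
    simp only [Bool.and_eq_true, decide_eq_true_eq, beq_iff_eq] at h
    rcases Nat.lt_or_ge k (pvCnt l) with hlt | hge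
    · exact hlt
    · exfalso
      have he : k = pvCnt l := le_antisymm hk hge
      exact pvCnt_stop l (he ▸ h.1) (he ▸ h.2)
  · intro h
    obtain ⟨h1, h2⟩ := pvCnt_lt_getD l k h
    simp only [Bool.and_eq_true, decide_eq_true_eq, beq_iff_eq]
    exact ⟨h1, h2⟩

-- the scan computes the minimum of the leading-space counts
theorem pvScan_eq (h : List Char) (t : List (List Char)) (fuel k : Nat)
    (hk : ∀ l ∈ h :: t, k ≤ pvCnt l)
    (hf : (t.map pvCnt).foldl min (pvCnt h) ≤ k + fuel) :
    pvScan (h :: t) k fuel = (t.map pvCnt).foldl min (pvCnt h) := by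
  induction fuel generalizing k with
  | zero =>
      have hkM : k ≤ (t.map pvCnt).foldl min (pvCnt h) := by
        rw [pv_le_foldl_min]
        exact ⟨hk h (by simp), fun x hx => by
          rcases List.mem_map.1 hx with ⟨l, hl, rfl⟩
          exact hk l (by simp [hl])⟩
      simp only [pvScan]
      omega
  | succ fuel ih =>
      by_cases hc : (h :: t).all (fun l => decide (k < l.length) && (l.getD k ' ' == ' ')) = true
      · have hall : ∀ l ∈ h :: t, k < pvCnt l := by
          intro l hl
          exact (pv_cond_iff l k (hk l hl)).1 (by
            have := List.all_eq_true.1 hc l hl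
            simpa using this)
        have hk' : ∀ l ∈ h :: t, k + 1 ≤ pvCnt l := fun l hl => hall l hl
        simp only [pvScan]
        rw [if_pos hc]
        exact ih (k + 1) hk' (by omega)
      · simp only [pvScan]
        rw [if_neg hc]
        have hkM : k ≤ (t.map pvCnt).foldl min (pvCnt h) := by
          rw [pv_le_foldl_min]
          exact ⟨hk h (by simp), fun x hx => by
            rcases List.mem_map.1 hx with ⟨l, hl, rfl⟩
            exact hk l (by simp [hl])⟩
        rcases Nat.lt_or_ge k ((t.map pvCnt).foldl min (pvCnt h)) with hlt | hge
        · exfalso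
          apply hc
          rw [List.all_eq_true]
          intro l hl
          have hkl : k + 1 ≤ pvCnt l := by
            have := (pv_le_foldl_min (t.map pvCnt) (pvCnt h) (k + 1)).1 hlt
            rcases (by simpa using hl : l = h ∨ l ∈ t) with rfl | hmem
            · exact this.1
            · exact this.2 (pvCnt l) (List.mem_map.2 ⟨l, hmem, rfl⟩)
          simpa using (pv_cond_iff l k (hk l hl)).2 hkl
        · omega

-- ===== VERDICT =====
theorem compute_indent_prefix_spec : Claim_equal_compute_indent_prefix := by
  intro s _
  unfold Spec_compute_indent_prefix compute_indent_prefix compute_indent_prefix_alt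
  have hA : (PySem.Chars.splitOn s.toList ['\n']).foldl
      (fun pfx line =>
        if PySem.Chars.strip line == [] then pfx
        else
          let ls := leading_spaces line
          match pfx with
          | none   => some ls
          | some p => some (p.take (min p.length ls.length))) none
      = (PySem.Chars.splitOn s.toList ['\n']).foldl pvStepA none := rfl
  rw [hA, pvFold_none]
  cases hL : (PySem.Chars.splitOn s.toList ['\n']).filter
      (fun l => !(PySem.Chars.strip l == [])) with
  | nil =>
      have hc : pvCounts (PySem.Chars.splitOn s.toList ['\n']) = [] := by
        unfold pvCounts; rw [hL]; rfl
      rw [hc]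
      rfl
  | cons h t =>
      have hc : pvCounts (PySem.Chars.splitOn s.toList ['\n']) = pvCnt h :: t.map pvCnt := by
        unfold pvCounts; rw [hL]; rfl
      rw [hc]
      have hscan : pvScan (h :: t) 0 h.length = (t.map pvCnt).foldl min (pvCnt h) := by
        apply pvScan_eq
        · intro l _; exact Nat.zero_le _
        · calc (t.map pvCnt).foldl min (pvCnt h) ≤ pvCnt h := pv_foldl_min_le_init _ _
            _ ≤ h.length := pvCnt_le_length h
            _ ≤ 0 + h.length := by omega
      exact congrArg (fun n => String.ofList (List.replicate n ' ')) hscan.symm
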